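-- pv_equiv track=rewrite | github.com/ElchaabiMohamed/InferCode_SVM | NC-5690-python-files/program_757.py | prononcable
-- ===== SOURCE A (Python) =====
-- def prononcable(mot):
--   if mot=='':
--     res=True
--     return res
--   else:
--     res=True
--     aux=''
--     for c in mot:
--       if c==aux:
--         res=False
--       aux=c
--   return res
-- ===== SOURCE B (Python) =====
-- def prononcable(mot):
--     # Divide and conquer: a word has no equal adjacent pair iff both halves
--     # have none and the pair straddling the cut differs.
--     n = len(mot)
--     if n < 2:
--         return True
--     m = n // 2
--     return mot[m-1] != mot[m] and prononcable(mot[:m]) and prononcable(mot[m:])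
-- ===== Notes on version B (the rewrite author's own statement) =====
-- stated objective: alternative
-- what changed: Replaces A's stateful left-to-right scan (result flag + previous-character sentinel, no early exit) by a divide-and-conquer recursion: split the word at the midpoint, check the straddling pair, and recurse on both halves with short-circuiting and.
import Mathlib
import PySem

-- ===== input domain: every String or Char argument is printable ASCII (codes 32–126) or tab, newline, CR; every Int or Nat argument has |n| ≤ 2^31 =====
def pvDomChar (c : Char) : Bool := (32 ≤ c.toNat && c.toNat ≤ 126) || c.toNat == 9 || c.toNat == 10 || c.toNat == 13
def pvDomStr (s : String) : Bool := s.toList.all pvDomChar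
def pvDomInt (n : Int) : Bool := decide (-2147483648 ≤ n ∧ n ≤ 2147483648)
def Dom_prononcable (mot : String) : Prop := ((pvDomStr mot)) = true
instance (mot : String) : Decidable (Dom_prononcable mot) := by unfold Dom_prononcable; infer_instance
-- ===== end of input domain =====

-- B replaces A's stateful flag-and-sentinel scan by a divide-and-conquer recursion
-- (split at the midpoint, check the straddling pair, recurse on both halves); alternative decomposition, same result.

-- ===== PORT A =====
-- A keeps a result flag `res` and the previous character `aux` (a string, initially "") and scans.
def prononcable (mot : String) : Bool :=
  if mot = "" then
    true
  else
    (mot.toList.foldl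
      (fun (st : Bool × String) c =>
        (if String.ofList [c] == st.2 then false else st.1, String.ofList [c]))
      (true, "")).1

-- ===== PORT B =====
-- B's recursion on the character list: if len < 2 return True, else split at m = n // 2
-- and return mot[m-1] != mot[m] and prononcable(mot[:m]) and prononcable(mot[m:]).
def prononcableAltRec (l : List Char) : Bool :=
  if l.length < 2 then
    true
  else
    (l[l.length / 2 - 1]! != l[l.length / 2]!)
      && (prononcableAltRec (l.take (l.length / 2))
      && prononcableAltRec (l.drop (l.length / 2)))
termination_by l.length
decreasing_by
  · simp only [List.length_take]
    omega
  · simp only [List.length_drop]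
    omega

def prononcable_alt (mot : String) : Bool :=
  prononcableAltRec mot.toList

-- ===== PRECONDITION & SPEC =====
def Spec_prononcable (mot : String) (out : Bool) : Prop := out = prononcable_alt mot
instance (mot : String) (out : Bool) : Decidable (Spec_prononcable mot out) := by unfold Spec_prononcable; infer_instance

-- ===== CLAIM (what is proved, stated in full; the proofs are below) =====
def Claim_equal_prononcable : Prop := ∀ (mot : String), Dom_prononcable mot → Spec_prononcable mot (prononcable mot)

-- ===== LEMMAS AND PROOFS =====

theorem mkSingle_beq (c p : Char) : (String.ofList [c] == String.ofList [p]) = (c == p) := by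
  by_cases h : c = p
  · simp [h]
  · have hne : ¬ String.ofList [c] = String.ofList [p] := by
      intro e
      have := congrArg String.toList e
      simp at this
      exact h this
    simp [h, hne]

theorem foldA_eq_zip (l : List Char) (r : Bool) (p : Char) :
    (l.foldl
      (fun (st : Bool × String) c =>
        (if String.ofList [c] == st.2 then false else st.1, String.ofList [c]))
      (r, String.ofList [p])).1
    = (r && ((p :: l).zip l).all (fun q => q.1 != q.2)) := by
  induction l generalizing r p with
  | nil => simp
  | cons c cs ih =>
    simp only [List.foldl_cons, List.zip_cons_cons, List.all_cons, ih, mkSingle_beq]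
    by_cases h : c = p
    · simp [h]
    · have hne : p ≠ c := fun e => h e.symm
      have hbne : (p != c) = true := by simpa using hne
      rw [hbne]
      simp [h]

theorem zipAll_eq_chain (l : List Char) :
    ((l.zip l.tail).all fun q => q.1 != q.2)
      = decide (List.IsChain (fun a b : Char => a ≠ b) l) := by
  induction l with
  | nil => simp
  | cons a t ih =>
    cases t with
    | nil => simp
    | cons b s =>
      simp only [List.tail_cons, List.zip_cons_cons, List.all_cons] at ih ⊢
      rw [ih]
      by_cases hab : a = b <;> simp [List.isChain_cons_cons, hab]

theorem altRec_eq_chain (l : List Char) :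
    prononcableAltRec l = decide (List.IsChain (fun a b : Char => a ≠ b) l) := by
  induction l using prononcableAltRec.induct with
  | case1 l h =>
    rw [prononcableAltRec]
    match l, h with
    | [], _ => simp
    | [a], _ => simp
  | case2 l h ih1 ih2 =>
    rw [prononcableAltRec, if_neg h]
    have h2 : 2 ≤ l.length := by omega
    have hm1 : 1 ≤ l.length / 2 := by omega
    have hmlt : l.length / 2 < l.length := by omega
    have hchain : List.IsChain (fun a b : Char => a ≠ b) l
        ↔ List.IsChain (fun a b : Char => a ≠ b) (l.take (l.length / 2))
          ∧ List.IsChain (fun a b : Char => a ≠ b) (l.drop (l.length / 2))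
          ∧ ∀ x ∈ (l.take (l.length / 2)).getLast?, ∀ y ∈ (l.drop (l.length / 2)).head?, x ≠ y := by
      conv_lhs => rw [← List.take_append_drop (l.length / 2) l]
      exact List.isChain_append
    have hlast : (l.take (l.length / 2)).getLast? = l[l.length / 2 - 1]? := by
      rw [List.getLast?_eq_getElem?, List.getElem?_take, List.length_take]
      have : min (l.length / 2) l.length = l.length / 2 := by omega
      rw [this, if_pos (by omega)]
    have hhead : (l.drop (l.length / 2)).head? = l[l.length / 2]? := List.head?_drop
    have hglt : l.length / 2 - 1 < l.length := by omega
    have hg1 : l[l.length / 2 - 1]? = some (l[l.length / 2 - 1]'hglt) := List.getElem?_eq_getElem hglt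
    have hg2 : l[l.length / 2]? = some (l[l.length / 2]'hmlt) := List.getElem?_eq_getElem hmlt
    have hb1 : l[l.length / 2 - 1]! = l[l.length / 2 - 1]'hglt := by
      rw [List.getElem!_eq_getElem?_getD, hg1]; rfl
    have hb2 : l[l.length / 2]! = l[l.length / 2]'hmlt := by
      rw [List.getElem!_eq_getElem?_getD, hg2]; rfl
    rw [ih1, ih2, hb1, hb2]
    rw [show (decide (List.IsChain (fun a b : Char => a ≠ b) l))
        = decide (List.IsChain (fun a b : Char => a ≠ b) (l.take (l.length / 2))
          ∧ List.IsChain (fun a b : Char => a ≠ b) (l.drop (l.length / 2))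
          ∧ ∀ x ∈ (l.take (l.length / 2)).getLast?, ∀ y ∈ (l.drop (l.length / 2)).head?, x ≠ y)
      from by simp [hchain]]
    rw [hlast, hhead, hg1, hg2]
    by_cases hab : l[l.length / 2 - 1]'hglt = l[l.length / 2]'hmlt
    · simp [hab]
    · have hf : (l[l.length / 2 - 1]'hglt == l[l.length / 2]'hmlt) = false := by
        simpa using hab
      simp [hab, bne, hf, Bool.and_comm]

-- ===== VERDICT (by name: the statement is the Claim_ definition above) =====
theorem prononcable_spec : Claim_equal_prononcable := by
  intro mot _
  unfold Spec_prononcable prononcable prononcable_alt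
  by_cases h : mot = ""
  · subst h
    rw [prononcableAltRec]
    simp
  · have hl : mot.toList ≠ [] := by
      simpa [String.toList_eq_nil_iff] using h
    obtain ⟨c, cs, hcc⟩ := List.exists_cons_of_ne_nil hl
    have hmk : (String.ofList [c] == "") = false := by simp
    rw [altRec_eq_chain, ← zipAll_eq_chain]
    simp only [h, if_false, hcc, List.foldl_cons, hmk, Bool.false_eq_true,
      List.tail_cons, foldA_eq_zip, Bool.true_and]
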